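-- pv_equiv track=rewrite | github.com/eunzi-kim/AL-S | 은지/LV2/문자열 압축.py | solution
-- ===== SOURCE A (Python) =====
-- def solution(s):
--     n = len(s)
--     answer = n
--     # 문자열 자르기
--     for x in range(1, n):
--         exam = ''
--         pre = ''
--         cnt = 0
--         for i in range(0, n, x):
--             # 과거 문자열과 현재 문자열이 다른 경우
--             if s[i:i+x] != pre:
--                 if cnt > 1:
--                     exam += str(cnt) + pre
--                 else:
--                     exam += pre
--                 pre = s[i:i+x]
--                 # 개수 초기화
--                 cnt = 1
--                 # 마지막 문자열
--                 if i >= n-x: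
--                     exam += pre
--             # 과거 문자열과 현재 문자열이 같은 경우
--             else:
--                 # 마지막 문자열
--                 if i >= n-x:
--                     exam += str(cnt+1) + s[i:i+x]
--                 cnt += 1
--         # 최소 문자열 탐색
--         if answer > len(exam):
--             answer = len(exam)
--     return answer
-- ===== SOURCE B (Python) =====
-- def solution(s):
--     n = len(s)
--     best = n
--     for x in range(1, n):
--         starts = [j for j in range(0, n, x) if j == 0 or s[j:j+x] != s[j-x:j]]
--         end = -(-n // x) * x
--         total = 0
--         for p, q in zip(starts, starts[1:] + [end]):
--             c = (q - p) // x
--             total += min(x, n - p) + (len(str(c)) if c > 1 else 0)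
--         if total < best:
--             best = total
--     return best
-- ===== Notes on version B (the rewrite author's own statement) =====
-- stated objective: alternative
-- what changed: A runs a stateful run-length-encoding emitter (prev/cnt state machine building the compressed string with special last-chunk branches); B never tracks runs with state: it finds the run-boundary chunk indices by direct slice comparison s[j:j+x] != s[j-x:j], derives each run's count arithmetically as the difference of consecutive boundary positions divided by x, and sums min(x, n-p) + len(str(count)) over the boundary list.
import Mathlib
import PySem

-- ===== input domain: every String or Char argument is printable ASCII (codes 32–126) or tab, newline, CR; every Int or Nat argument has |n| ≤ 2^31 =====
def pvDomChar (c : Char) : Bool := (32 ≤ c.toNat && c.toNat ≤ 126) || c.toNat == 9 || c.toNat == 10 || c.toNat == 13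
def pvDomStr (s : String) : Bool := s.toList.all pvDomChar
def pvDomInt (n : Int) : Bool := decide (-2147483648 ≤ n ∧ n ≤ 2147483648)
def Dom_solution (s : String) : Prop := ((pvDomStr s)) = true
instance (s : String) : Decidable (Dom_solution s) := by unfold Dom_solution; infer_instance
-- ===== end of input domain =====

-- B replaces A's stateful run-length-encoding emitter by a boundary-index pass: it collects the
-- chunk indices where a new run starts (s[j:j+x] != s[j-x:j]) and derives each run's count
-- arithmetically from consecutive boundary positions; objective: alternative (no speed claim).

-- ===== PORT A =====
-- inner 'for i in range(0, n, x)' loop of A, recursion over the index list; state (exam, pre, cnt)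
def solLoopA (s : List Char) (n x : Int) : List Int → List Char → List Char → Int → List Char
  | [], exam, _, _ => exam
  | i :: rest, exam, pre, cnt =>
    let c := PySem.List.slice s (some i) (some (i + x))   -- s[i:i+x]
    if c ≠ pre then
      let exam1 := if cnt > 1 then exam ++ PySem.Int.toChars cnt ++ pre else exam ++ pre
      let exam2 := if i ≥ n - x then exam1 ++ c else exam1
      solLoopA s n x rest exam2 c 1
    else
      let exam1 := if i ≥ n - x then exam ++ PySem.Int.toChars (cnt + 1) ++ c else exam
      solLoopA s n x rest exam1 pre (cnt + 1)

def solution (s : String) : Int :=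
  let cs := s.toList
  let n : Int := cs.length
  (PySem.List.pyRange 1 n 1).foldl
    (fun answer x =>
      let exam := solLoopA cs n x (PySem.List.pyRange 0 n x) [] [] 0
      if answer > (exam.length : Int) then (exam.length : Int) else answer)
    n

-- ===== PORT B =====
def solution_alt (s : String) : Int :=
  let cs := s.toList
  let n : Int := cs.length
  (PySem.List.pyRange 1 n 1).foldl
    (fun best x =>
      -- starts = [j for j in range(0, n, x) if j == 0 or s[j:j+x] != s[j-x:j]]
      let starts := (PySem.List.pyRange 0 n x).filter
        (fun j => j == 0 ||
          PySem.List.slice cs (some j) (some (j + x)) != PySem.List.slice cs (some (j - x)) (some j))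
      -- end = -(-n // x) * x
      let endv := -(PySem.Int.floordiv (-n) x) * x
      -- for p, q in zip(starts, starts[1:] + [end]): total += min(x, n-p) + (len(str(c)) if c>1 else 0)
      let total := (starts.zip (starts.drop 1 ++ [endv])).foldl
        (fun t pq =>
          let c := PySem.Int.floordiv (pq.2 - pq.1) x
          t + (min x (n - pq.1) + (if c > 1 then ((PySem.Int.toChars c).length : Int) else 0))) 0
      if total < best then total else best)
    n

-- ===== PRECONDITION & SPEC =====
def Spec_solution (s : String) (out : Int) : Prop := out = solution_alt s
instance (s : String) (out : Int) : Decidable (Spec_solution s out) := by unfold Spec_solution; infer_instance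

-- ===== CLAIM (what is proved, stated in full; the proofs are below) =====
def Claim_equal_solution : Prop := ∀ (s : String), Dom_solution s → Spec_solution s (solution s)

-- ===== LEMMAS AND PROOFS =====\n

-- digit-length contribution of a run of count c
def digE (c : Int) : Int := if c > 1 then ((PySem.Int.toChars c).length : Int) else 0

-- B's per-run sum over the boundary list, open run starting at p
def runSum (cs : List Char) (x endv : Int) (p : Int) : List Int → Int
  | [] => min x ((cs.length : Int) - p) + digE (PySem.Int.floordiv (endv - p) x)
  | q :: rest => min x ((cs.length : Int) - p) + digE (PySem.Int.floordiv (q - p) x) + runSum cs x endv q rest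

-- boundary indices from position a on (the j == 0 clause dropped: a > 0 below)
def startsFrom (cs : List Char) (x a : Int) : List Int :=
  (PySem.List.pyRange a (cs.length : Int) x).filter
    (fun j => PySem.List.slice cs (some j) (some (j + x)) != PySem.List.slice cs (some (j - x)) (some j))

-- pyRange with positive step: nil and cons forms
lemma pyRange_pos_nil (a b x : Int) (hx : 0 < x) (h : b ≤ a) :
    PySem.List.pyRange a b x = [] := by
  rw [PySem.List.pyRange_of_pos a b hx]
  simp [show ¬ a < b by omega]

lemma pyRange_pos_cons (a b x : Int) (hx : 0 < x) (h : a < b) :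
    PySem.List.pyRange a b x = a :: PySem.List.pyRange (a + x) b x := by
  rw [PySem.List.pyRange_of_pos a b hx, PySem.List.pyRange_of_pos (a + x) b hx]
  have hd : (0:Int) ≤ b - a - 1 := by omega
  have hq : (0:Int) ≤ (b - a - 1) / x := Int.ediv_nonneg hd (le_of_lt hx)
  have key : b - a + x - 1 = (b - a - 1) + 1 * x := by ring
  have hcount : (b - a + x - 1) / x = (b - a - 1) / x + 1 := by
    rw [key, Int.add_mul_ediv_right _ _ (by omega : x ≠ 0)]
  have hc2 : (if a + x < b then ((b - (a + x) + x - 1) / x).toNat else 0)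
      = ((b - a - 1) / x).toNat := by
    by_cases hlt : a + x < b
    · simp [hlt, show b - (a + x) + x - 1 = b - a - 1 by ring]
    · have hsmall : b - a - 1 < x := by omega
      have : (b - a - 1) / x = 0 := Int.ediv_eq_zero_of_lt hd hsmall
      simp [hlt, this]
  rw [hc2]
  simp only [if_pos h, hcount]
  have : ((b - a - 1) / x + 1).toNat = ((b - a - 1) / x).toNat + 1 := by omega
  rw [this, List.range_succ_eq_map, List.map_cons, List.map_map]
  congr 1
  · simp
  · apply List.map_congr_left
    intro k _
    simp only [Function.comp_apply]
    push_cast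
    ring

-- startsFrom: past the end, at a continuing chunk, at a run boundary
lemma startsFrom_nil (cs : List Char) (x a : Int) (hx : 0 < x) (h : (cs.length : Int) ≤ a) :
    startsFrom cs x a = [] := by
  unfold startsFrom
  rw [pyRange_pos_nil a _ x hx h]
  rfl

lemma startsFrom_skip (cs : List Char) (x a : Int) (hx : 0 < x) (han : a < (cs.length : Int))
    (h : PySem.List.slice cs (some a) (some (a + x)) = PySem.List.slice cs (some (a - x)) (some a)) :
    startsFrom cs x a = startsFrom cs x (a + x) := by
  unfold startsFrom
  rw [pyRange_pos_cons a _ x hx han, List.filter_cons]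
  simp [h]

lemma startsFrom_cons_ne (cs : List Char) (x a : Int) (hx : 0 < x) (han : a < (cs.length : Int))
    (h : PySem.List.slice cs (some a) (some (a + x)) ≠ PySem.List.slice cs (some (a - x)) (some a)) :
    startsFrom cs x a = a :: startsFrom cs x (a + x) := by
  unfold startsFrom
  rw [pyRange_pos_cons a _ x hx han, List.filter_cons]
  simp [h]

-- chunk length: for 0 ≤ a ≤ |cs| and 0 ≤ x, |cs[a:a+x]| = min x (|cs| - a)
lemma chunk_len (cs : List Char) (a x : Int) (h0 : 0 ≤ a) (ha : a ≤ (cs.length : Int))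
    (hx : 0 ≤ x) :
    ((PySem.List.slice cs (some a) (some (a + x))).length : Int) = min x ((cs.length : Int) - a) := by
  rw [PySem.List.slice_toNat cs h0 (by omega : (0:Int) ≤ a + x)]
  simp only [List.length_take, List.length_drop]
  omega

-- exact multiples divide evenly
lemma fd_mul (c x : Int) (hx : 0 < x) : PySem.Int.floordiv (c * x) x = c := by
  rw [PySem.Int.floordiv_eq_iff_of_pos hx]
  constructor <;> nlinarith

-- end = -(-n // x) * x equals a + x when a < n ≤ a + x and x ∣ a
lemma endv_eq (n a x : Int) (hx : 0 < x) (hdvd : x ∣ a) (h1 : a < n) (h2 : n ≤ a + x) :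
    -(PySem.Int.floordiv (-n) x) * x = a + x := by
  obtain ⟨k, hk⟩ := hdvd
  have : -(PySem.Int.floordiv (-n) x) = k + 1 := by
    rw [PySem.Int.neg_floordiv_neg_eq_iff_of_pos hx]
    constructor <;> nlinarith
  rw [this]; nlinarith

-- B's zip fold computes runSum
lemma zipfold (cs : List Char) (x endv : Int) :
    ∀ (l : List Int) (p t : Int),
      ((p :: l).zip (l ++ [endv])).foldl
        (fun t pq =>
          let c := PySem.Int.floordiv (pq.2 - pq.1) x
          t + (min x ((cs.length : Int) - pq.1) +
            (if c > 1 then ((PySem.Int.toChars c).length : Int) else 0))) t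
      = t + runSum cs x endv p l := by
  intro l
  induction l with
  | nil => intro p t; simp [runSum, digE]
  | cons q rest ih =>
    intro p t
    simp only [List.cons_append, List.zip_cons_cons, List.foldl_cons]
    rw [ih q]
    simp only [runSum, digE]
    ring

-- main invariant: A's emit loop from index a (open run started at p with cnt chunks so far,
-- pre = cs[a-x:a]) produces a string whose length is B's boundary sum from a
lemma loop_eq (cs : List Char) (x : Int) (hx : 0 < x) :
    ∀ (k : Nat) (a p cnt : Int) (exam : List Char) (total : Int),
      ((cs.length : Int) - a).toNat = k →
      x ≤ a → a < (cs.length : Int) → x ∣ a → 0 ≤ p → p + cnt * x = a → 1 ≤ cnt →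
      ((exam.length : Int)) = total →
      ((solLoopA cs (cs.length : Int) x (PySem.List.pyRange a (cs.length : Int) x) exam
          (PySem.List.slice cs (some (a - x)) (some a)) cnt).length : Int)
        = total + runSum cs x (-(PySem.Int.floordiv (-(cs.length : Int)) x) * x) p (startsFrom cs x a) := by
  intro k
  induction k using Nat.strong_induction_on with
  | _ k ih =>
    intro a p cnt exam total hk hxa han hdvd hp0 hpc hcnt htot
    set n : Int := (cs.length : Int) with hn
    have hrange := pyRange_pos_cons a n x hx han
    rw [hrange]
    simp only [solLoopA]
    have hclen : ((PySem.List.slice cs (some a) (some (a + x))).length : Int) = min x (n - a) :=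
      chunk_len cs a x (by omega) (by omega) (by omega)
    have hprelen : ((PySem.List.slice cs (some (a - x)) (some a)).length : Int) = x := by
      have h := chunk_len cs (a - x) x (by omega) (by omega) (by omega)
      rw [show a - x + x = a by ring] at h
      rw [h]; omega
    by_cases hceq : PySem.List.slice cs (some a) (some (a + x)) = PySem.List.slice cs (some (a - x)) (some a)
    · -- run continues
      rw [if_neg (fun hne => hne hceq), startsFrom_skip cs x a hx han hceq]
      by_cases hend : a ≥ n - x
      · -- last chunk; continuing run forces n = a + x
        have hnax : n = a + x := by
          have h1 := congrArg List.length hceq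
          have h2 : ((PySem.List.slice cs (some a) (some (a + x))).length : Int)
              = ((PySem.List.slice cs (some (a - x)) (some a)).length : Int) := by exact_mod_cast h1
          rw [hclen, hprelen] at h2
          omega
        rw [if_pos hend, pyRange_pos_nil (a + x) n x hx (by omega),
          startsFrom_nil cs x (a + x) hx (by omega)]
        simp only [solLoopA, runSum]
        rw [endv_eq n a x hx hdvd (by omega) (by omega)]
        rw [show a + x - p = (cnt + 1) * x by linarith, fd_mul (cnt + 1) x hx]
        have hdig : digE (cnt + 1) = ((PySem.Int.toChars (cnt + 1)).length : Int) := by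
          unfold digE; rw [if_pos (by omega)]
        rw [hdig]
        have hmin : min x (n - p) = x := by
          have h3 : n - p = (cnt + 1) * x := by linarith
          have h4 : x ≤ (cnt + 1) * x := by nlinarith
          omega
        rw [hmin]
        have hclenx : ((PySem.List.slice cs (some a) (some (a + x))).length : Int) = x := by
          rw [hclen]; omega
        push_cast [List.length_append]
        omega
      · -- middle chunk, run continues
        rw [if_neg hend]
        have hthis := ih ((n - (a + x)).toNat) (by omega) (a + x) p (cnt + 1) exam total rfl
          (by omega) (by omega) (hdvd.add (dvd_refl x)) hp0 (by linarith) (by omega) htot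
        rw [show a + x - x = a by ring] at hthis
        rw [← hceq]
        exact hthis
    · -- new run starts at a
      rw [if_pos hceq, startsFrom_cons_ne cs x a hx han hceq]
      have hemit1 : (((if cnt > 1 then exam ++ PySem.Int.toChars cnt ++ PySem.List.slice cs (some (a - x)) (some a)
            else exam ++ PySem.List.slice cs (some (a - x)) (some a)).length : Int))
          = total + digE cnt + x := by
        unfold digE
        by_cases h1 : cnt > 1
        · rw [if_pos h1, if_pos h1]; push_cast [List.length_append]; omega
        · rw [if_neg h1, if_neg h1]; push_cast [List.length_append]; omega
      have hminp : min x (n - p) = x := by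
        have hple : p ≤ a - x := by nlinarith
        omega
      have hfdc : PySem.Int.floordiv (a - p) x = cnt := by
        rw [show a - p = cnt * x by linarith]
        exact fd_mul cnt x hx
      by_cases hend : a ≥ n - x
      · -- a starts the final run
        rw [if_pos hend, pyRange_pos_nil (a + x) n x hx (by omega),
          startsFrom_nil cs x (a + x) hx (by omega)]
        simp only [solLoopA, runSum]
        rw [endv_eq n a x hx hdvd (by omega) (by omega)]
        rw [show a + x - a = 1 * x by ring, fd_mul 1 x hx, hfdc, hminp]
        rw [show digE 1 = 0 by unfold digE; rw [if_neg (by omega)]]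
        push_cast [List.length_append]
        omega
      · -- middle chunk, new run
        rw [if_neg hend]
        have hthis := ih ((n - (a + x)).toNat) (by omega) (a + x) a 1
          (if cnt > 1 then exam ++ PySem.Int.toChars cnt ++ PySem.List.slice cs (some (a - x)) (some a)
            else exam ++ PySem.List.slice cs (some (a - x)) (some a))
          (total + digE cnt + x) rfl
          (by omega) (by omega) (hdvd.add (dvd_refl x)) (by omega) (by ring) (by omega) hemit1
        rw [show a + x - x = a by ring] at hthis
        rw [hthis]
        simp only [runSum]
        rw [hfdc, hminp]
        ring

-- the first chunk cs[0:x] is nonempty when cs ≠ [] and 0 < x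
lemma chunk0_ne_nil (cs : List Char) (x : Int) (hn : 0 < (cs.length : Int)) (hx : 0 < x) :
    PySem.List.slice cs (some 0) (some (0 + x)) ≠ [] := by
  intro hcontra
  have h := congrArg List.length hcontra
  rw [PySem.List.slice_toNat cs le_rfl (by omega : (0:Int) ≤ 0 + x)] at h
  simp only [List.length_take, List.length_drop, List.length_nil] at h
  omega

-- the j == 0 clause of B's filter never fires for j ≥ a > 0
lemma filter_drop_zero (cs : List Char) (x a : Int) (ha : 0 < a) (hx : 0 < x) :
    (PySem.List.pyRange a (cs.length : Int) x).filter
      (fun j => j == 0 ||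
        PySem.List.slice cs (some j) (some (j + x)) != PySem.List.slice cs (some (j - x)) (some j))
    = startsFrom cs x a := by
  unfold startsFrom
  apply List.filter_congr
  intro j hj
  have hmem := (PySem.List.mem_pyRange_iff_of_pos hx j).mp hj
  have hj0 : (j == 0) = false := by
    simp only [beq_eq_false_iff_ne, ne_eq]
    omega
  rw [hj0, Bool.false_or]

-- per chunk size x with 1 ≤ x < n: A's compressed-string length equals B's boundary-sum total
lemma inner_eq (cs : List Char) (x : Int) (hx : 1 ≤ x) (hxn : x < (cs.length : Int)) :
    ((solLoopA cs (cs.length : Int) x (PySem.List.pyRange 0 (cs.length : Int) x) [] [] 0).length : Int)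
      = (((PySem.List.pyRange 0 (cs.length : Int) x).filter
            (fun j => j == 0 ||
              PySem.List.slice cs (some j) (some (j + x)) != PySem.List.slice cs (some (j - x)) (some j))).zip
          ((((PySem.List.pyRange 0 (cs.length : Int) x).filter
            (fun j => j == 0 ||
              PySem.List.slice cs (some j) (some (j + x)) != PySem.List.slice cs (some (j - x)) (some j))).drop 1)
            ++ [-(PySem.Int.floordiv (-(cs.length : Int)) x) * x])).foldl
          (fun t pq =>
            let c := PySem.Int.floordiv (pq.2 - pq.1) x
            t + (min x ((cs.length : Int) - pq.1) +
              (if c > 1 then ((PySem.Int.toChars c).length : Int) else 0))) 0 := by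
  set n : Int := (cs.length : Int) with hn
  have hn0 : 0 < n := by omega
  have hrange := pyRange_pos_cons 0 n x (by omega) hn0
  rw [hrange]
  simp only [solLoopA]
  have hc0ne : PySem.List.slice cs (some 0) (some (0 + x)) ≠ [] := chunk0_ne_nil cs x hn0 (by omega)
  rw [if_pos (by simpa using hc0ne), if_neg (by omega : ¬ ((0:Int) > 1)),
    if_neg (by omega : ¬ ((0:Int) ≥ n - x))]
  rw [List.filter_cons]
  rw [show ((0:Int) == 0 ||
      PySem.List.slice cs (some 0) (some (0 + x)) != PySem.List.slice cs (some (0 - x)) (some 0)) = true by simp]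
  simp only [if_true]
  rw [filter_drop_zero cs x (0 + x) (by omega) (by omega), List.drop_one, List.tail_cons]
  rw [zipfold cs x (-(PySem.Int.floordiv (-n) x) * x) (startsFrom cs x (0 + x)) 0 0]
  have hthis := loop_eq cs x (by omega) ((n - (0 + x)).toNat) (0 + x) 0 1 ([] ++ []) 0 rfl
    (by omega) (by omega) ⟨1, by ring⟩ le_rfl (by ring) le_rfl (by simp)
  rw [show (0:Int) + x - x = 0 by ring] at hthis
  simpa using hthis

-- ===== VERDICT (by name: the statement is the Claim_ definition above) =====
theorem solution_spec : Claim_equal_solution := by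
  intro s _
  unfold Spec_solution solution solution_alt
  simp only []
  apply PySem.List.foldl_congr_mem
  intro answer x hx
  have hmem := PySem.List.mem_pyRange_one.mp hx
  have h := inner_eq s.toList x (by omega) (by omega)
  rw [h]
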